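-- pv_equiv track=rewrite | github.com/air029/PolyFormer | node_classification_large_graph/utils.py | take_rest
-- ===== SOURCE A (Python) =====
-- def take_rest(x, y):
--     x.sort()
--     y.sort()
--     res = []
--     j, jmax = 0, len(y)
--     for i in range(0, len(x)):
--         flag = False
--         while j < jmax and y[j] <= x[i]:
--             if y[j] == x[i]:
--                 flag = True
--             j += 1
--         if not flag:
--             res.append(x[i])
--     return res
-- ===== SOURCE B (Python) =====
-- def take_rest(x, y):
--     x.sort()
--     y.sort()
--     drop = set(y)          # values of y with one occurrence still to remove
--     res = []
--     for v in x:
--         if v in drop: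
--             drop.discard(v)
--         else:
--             res.append(v)
--     return res
-- ===== Notes on version B (the rewrite author's own statement) =====
-- stated objective: idiomatic
-- what changed: Replaces the tandem two-pointer merge (index j, inner while, flag) with one pass over sorted x against a shrinking set built from y, discarding each matched value so only the first occurrence of a duplicate is dropped, exactly as A does.
import Mathlib
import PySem

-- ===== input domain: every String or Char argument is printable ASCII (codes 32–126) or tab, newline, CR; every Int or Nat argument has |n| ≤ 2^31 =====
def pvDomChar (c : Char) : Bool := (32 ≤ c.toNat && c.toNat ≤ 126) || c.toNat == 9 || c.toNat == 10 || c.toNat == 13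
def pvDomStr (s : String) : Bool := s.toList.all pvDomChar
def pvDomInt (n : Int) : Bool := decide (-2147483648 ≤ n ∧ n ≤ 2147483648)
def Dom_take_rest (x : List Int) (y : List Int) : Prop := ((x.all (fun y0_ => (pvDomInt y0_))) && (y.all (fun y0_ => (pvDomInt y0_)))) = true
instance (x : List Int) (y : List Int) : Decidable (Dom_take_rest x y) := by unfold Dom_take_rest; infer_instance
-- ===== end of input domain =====

-- B replaces A's two-pointer merge with one pass over sorted x against a shrinking set of y's
-- values (idiomatic, same cost); both Pythons sort x and y in place — equivalence is about the
-- RETURN value only (B performs the same mutations).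

-- ===== PORT A =====
-- inner 'while j < jmax and y[j] <= x[i]: …'
def takeRestWhile (ys : List Int) (xi : Int) (jmax : Nat) (j : Nat) (flag : Bool) : Nat × Bool :=
  if h : j < jmax ∧ ys.getD j 0 ≤ xi then
    takeRestWhile ys xi jmax (j + 1) (if ys.getD j 0 = xi then true else flag)
  else (j, flag)
termination_by jmax - j
decreasing_by omega

-- outer 'for i in range(0, len(x)): …' with state (j, res)
def takeRestLoop (ys : List Int) (jmax : Nat) : List Int → Nat → List Int → List Int
  | [], _, res => res
  | v :: xs, j, res =>
    let jf := takeRestWhile ys v jmax j false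
    takeRestLoop ys jmax xs jf.1 (if jf.2 then res else res ++ [v])

def take_rest (x : List Int) (y : List Int) : List Int :=
  let xs := PySem.List.sorted x (fun a => a) false
  let ys := PySem.List.sorted y (fun a => a) false
  takeRestLoop ys ys.length xs 0 []

-- ===== PORT B =====
def takeRestAltLoop : List Int → PySem.Set Int → List Int → List Int
  | [], _, res => res
  | v :: xs, drop, res =>
    if PySem.Set.contains drop v then takeRestAltLoop xs (PySem.Set.discard drop v) res
    else takeRestAltLoop xs drop (res ++ [v])

def take_rest_alt (x : List Int) (y : List Int) : List Int :=
  let xs := PySem.List.sorted x (fun a => a) false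
  let ys := PySem.List.sorted y (fun a => a) false
  takeRestAltLoop xs (PySem.Set.ofList ys) []

-- ===== PRECONDITION & SPEC =====
def Spec_take_rest (x : List Int) (y : List Int) (out : List Int) : Prop := out = take_rest_alt x y
instance (x : List Int) (y : List Int) (out : List Int) : Decidable (Spec_take_rest x y out) := by unfold Spec_take_rest; infer_instance

-- ===== CLAIM (what is proved, stated in full; the proofs are below) =====
def Claim_equal_take_rest : Prop := ∀ (x : List Int) (y : List Int), Dom_take_rest x y → Spec_take_rest x y (take_rest x y)

-- ===== LEMMAS AND PROOFS =====

lemma dropWhile_eq_drop_len {α : Type} (p : α → Bool) (l : List α) :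
    l.dropWhile p = l.drop (l.takeWhile p).length := by
  induction l with
  | nil => rfl
  | cons a t ih =>
    by_cases h : p a = true <;> simp [List.dropWhile, List.takeWhile, h, ih]

-- the while loop scans exactly the (· ≤ xi)-prefix of ys.drop j and records whether xi occurs in it
lemma takeRestWhile_spec (ys : List Int) (xi : Int) :
    ∀ (n j : Nat) (flag : Bool), ys.length - j ≤ n →
      takeRestWhile ys xi ys.length j flag =
        (j + ((ys.drop j).takeWhile (fun w => decide (w ≤ xi))).length,
         flag || decide (xi ∈ (ys.drop j).takeWhile (fun w => decide (w ≤ xi)))) := by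
  intro n
  induction n with
  | zero =>
    intro j flag hn
    have hj : ys.length ≤ j := by omega
    rw [takeRestWhile, dif_neg (fun h => absurd h.1 (by omega))]
    simp [List.drop_eq_nil_of_le hj]
  | succ n ih =>
    intro j flag hn
    rw [takeRestWhile]
    by_cases hj : j < ys.length
    · have hdrop : ys.drop j = ys[j] :: ys.drop (j + 1) := List.drop_eq_getElem_cons hj
      have hget : ys.getD j 0 = ys[j] := List.getD_eq_getElem ys 0 hj
      by_cases hle : ys[j] ≤ xi
      · have hn' : ys.length - (j + 1) ≤ n := by omega
        rw [dif_pos ⟨hj, by rw [hget]; exact hle⟩, ih (j + 1) _ hn', hdrop]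
        simp only [List.takeWhile_cons, decide_eq_true hle, if_true, hget,
          List.length_cons, Prod.mk.injEq]
        constructor
        · omega
        · by_cases he : ys[j] = xi
          · subst he; cases flag <;> simp
          · have hne : ¬ xi = ys[j] := fun h => he h.symm
            cases flag <;> simp [he, hne]
      · rw [dif_neg (by rw [hget]; tauto), hdrop]
        simp only [List.takeWhile_cons, decide_eq_false hle, Bool.false_eq_true, if_false,
          List.length_nil, Nat.add_zero, List.not_mem_nil, decide_false, Bool.or_false]
    · rw [dif_neg (fun h => absurd h.1 hj)]
      simp [List.drop_eq_nil_of_le (by omega : ys.length ≤ j)]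

-- on a sorted list, xi lies in the (· ≤ xi)-prefix iff it lies in the list
lemma mem_takeWhile_le_iff (xi : Int) (ts : List Int) (hs : ts.Pairwise (· ≤ ·)) :
    xi ∈ ts.takeWhile (fun w => decide (w ≤ xi)) ↔ xi ∈ ts := by
  induction ts with
  | nil => simp
  | cons a t ih =>
    rcases List.pairwise_cons.mp hs with ⟨ha, ht⟩
    by_cases h : a ≤ xi
    · simp [h, ih ht]
    · simp only [List.takeWhile_cons, decide_eq_true_eq, h, if_false]
      constructor
      · intro hx; cases hx
      · intro hx
        rcases List.mem_cons.mp hx with rfl | hx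
        · exact absurd le_rfl h
        · exact absurd (ha _ hx) h

-- every element surviving the (· ≤ xi)-dropWhile of a sorted list is > xi
lemma mem_dropWhile_gt (xi : Int) (ts : List Int) (hs : ts.Pairwise (· ≤ ·)) :
    ∀ w ∈ ts.dropWhile (fun w => decide (w ≤ xi)), xi < w := by
  induction ts with
  | nil => simp
  | cons a t ih =>
    rcases List.pairwise_cons.mp hs with ⟨ha, ht⟩
    by_cases h : a ≤ xi
    · simpa [h] using ih ht
    · intro w hw
      simp only [List.dropWhile_cons, decide_eq_true_eq, h, if_false] at hw
      rcases List.mem_cons.mp hw with rfl | hw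
      · omega
      · have := ha _ hw; omega

-- elements > xi are unaffected by the (· ≤ xi)-dropWhile
lemma mem_dropWhile_of_gt (xi u : Int) (hu : xi < u) (ts : List Int) :
    u ∈ ts.dropWhile (fun w => decide (w ≤ xi)) ↔ u ∈ ts := by
  induction ts with
  | nil => simp
  | cons a t ih =>
    by_cases h : a ≤ xi
    · have : u ≠ a := by omega
      simp [h, ih, this]
    · simp [h]

-- the central invariant: A's remaining suffix of ys and B's remaining set agree on all pending xs
lemma loop_eq (ys : List Int) (hys : ys.Pairwise (· ≤ ·)) :
    ∀ (xs : List Int) (j : Nat) (s : PySem.Set Int) (res : List Int),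
      j ≤ ys.length → xs.Pairwise (· ≤ ·) →
      (∀ u ∈ xs, (u ∈ ys.drop j ↔ u ∈ s)) →
      takeRestLoop ys ys.length xs j res = takeRestAltLoop xs s res := by
  intro xs
  induction xs with
  | nil => intro j s res _ _ _; rfl
  | cons v t ih =>
    intro j s res hj hxs hinv
    rcases List.pairwise_cons.mp hxs with ⟨hvle, ht⟩
    have hds : (ys.drop j).Pairwise (· ≤ ·) := hys.sublist (List.drop_sublist j ys)
    have hw := takeRestWhile_spec ys v (ys.length - j) j false (by omega)
    have hmem : v ∈ (ys.drop j).takeWhile (fun w => decide (w ≤ v)) ↔ v ∈ ys.drop j :=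
      mem_takeWhile_le_iff v _ hds
    set j' := j + ((ys.drop j).takeWhile (fun w => decide (w ≤ v))).length with hj'
    have hj'le : j' ≤ ys.length := by
      have hsub := List.Sublist.length_le
        (List.takeWhile_sublist (l := ys.drop j) (p := fun w => decide (w ≤ v)))
      simp only [List.length_drop] at hsub
      omega
    have hdrop' : ys.drop j' = (ys.drop j).dropWhile (fun w => decide (w ≤ v)) := by
      rw [dropWhile_eq_drop_len, hj', ← List.drop_drop]
    have hvs : v ∈ ys.drop j ↔ v ∈ s := hinv v (List.mem_cons_self ..)
    by_cases hv : v ∈ s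
    · have hflag : decide (v ∈ (ys.drop j).takeWhile (fun w => decide (w ≤ v))) = true :=
        decide_eq_true (hmem.mpr (hvs.mpr hv))
      have hcont : PySem.Set.contains s v = true := (PySem.Set.contains_iff s v).mpr hv
      have hinv' : ∀ u ∈ t, (u ∈ ys.drop j' ↔ u ∈ PySem.Set.discard s v) := by
        intro u hu
        rw [hdrop', PySem.Set.mem_discard]
        rcases lt_or_eq_of_le (hvle u hu) with hlt | rfl
        · rw [mem_dropWhile_of_gt v u hlt, hinv u (List.mem_cons_of_mem _ hu)]
          exact ⟨fun h => ⟨h, by omega⟩, fun h => h.1⟩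
        · constructor
          · intro h; exact absurd (mem_dropWhile_gt v _ hds v h) (by omega)
          · intro h; exact absurd rfl h.2
      simp only [takeRestLoop, takeRestAltLoop, hw, hflag, Bool.false_or, if_true, hcont]
      exact ih j' _ res hj'le ht hinv'
    · have hflag : decide (v ∈ (ys.drop j).takeWhile (fun w => decide (w ≤ v))) = false :=
        decide_eq_false (fun hm => hv (hvs.mp (hmem.mp hm)))
      have hcont : PySem.Set.contains s v = false := by
        rw [Bool.eq_false_iff]
        intro hc; exact hv ((PySem.Set.contains_iff s v).mp hc)
      have hinv' : ∀ u ∈ t, (u ∈ ys.drop j' ↔ u ∈ s) := by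
        intro u hu
        rw [hdrop']
        rcases lt_or_eq_of_le (hvle u hu) with hlt | rfl
        · rw [mem_dropWhile_of_gt v u hlt]
          exact hinv u (List.mem_cons_of_mem _ hu)
        · constructor
          · intro h; exact absurd (mem_dropWhile_gt v _ hds v h) (by omega)
          · intro h; exact absurd h hv
      simp only [takeRestLoop, takeRestAltLoop, hw, hflag, Bool.false_or, hcont]
      exact ih j' s (res ++ [v]) hj'le ht hinv'

-- ===== VERDICT (by name: the statement is the Claim_ definition above) =====
theorem take_rest_spec : Claim_equal_take_rest := by
  intro x y _
  unfold Spec_take_rest take_rest take_rest_alt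
  have hys : (PySem.List.sorted y (fun a => a) false).Pairwise (· ≤ ·) :=
    PySem.List.sorted_pairwise y (fun a => a)
  have hxs : (PySem.List.sorted x (fun a => a) false).Pairwise (· ≤ ·) :=
    PySem.List.sorted_pairwise x (fun a => a)
  exact loop_eq _ hys _ 0 _ [] (by omega) hxs
    (by intro u _; simp [PySem.Set.mem_ofList])
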